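-- pv_equiv track=rewrite | github.com/hoo29/advent-of-code-24 | d07.py | add_mask_p2
-- ===== SOURCE A (Python) =====
-- def add_mask_p2(mask: list[str], ind=0):
--     if ind == len(mask):
--         return None
--
--     if mask[ind] == "+":
--         mask[ind] = "*"
--     elif mask[ind] == "*":
--         mask[ind] = "||"
--     else:
--         mask[ind] = "+"
--         return add_mask_p2(mask, ind + 1)
--
--     return mask
-- ===== SOURCE B (Python) =====
-- def add_mask_p2(mask: list[str], ind=0):
--     # Iterative odometer: walk the indices with a for-loop instead of tail recursion.
--     for i in range(ind, len(mask)):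
--         if mask[i] == "+":
--             mask[i] = "*"
--             return mask
--         if mask[i] == "*":
--             mask[i] = "||"
--             return mask
--         mask[i] = "+"
--     return None
-- ===== Notes on version B (the rewrite author's own statement) =====
-- stated objective: idiomatic
-- what changed: Replaced the tail recursion with a flat for-loop over range(ind, len(mask)) that carries by advancing the loop index, mutating the same list and returning it (or None on overflow).
-- outside the precondition, e.g. on add_mask_p2(['+'], 5): A raises IndexError, B returns None
import Mathlib
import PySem

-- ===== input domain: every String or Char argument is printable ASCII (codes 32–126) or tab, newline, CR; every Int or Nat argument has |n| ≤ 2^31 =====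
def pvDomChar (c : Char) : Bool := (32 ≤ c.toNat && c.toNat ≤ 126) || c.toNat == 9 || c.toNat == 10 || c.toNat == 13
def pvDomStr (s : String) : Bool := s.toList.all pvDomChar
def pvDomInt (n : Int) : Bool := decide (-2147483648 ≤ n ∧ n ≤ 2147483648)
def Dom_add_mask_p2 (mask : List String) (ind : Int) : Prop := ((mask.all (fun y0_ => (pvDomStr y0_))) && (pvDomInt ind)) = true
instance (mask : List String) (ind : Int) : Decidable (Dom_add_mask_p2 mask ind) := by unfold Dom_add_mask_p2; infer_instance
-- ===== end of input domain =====

-- B replaces A's tail recursion by a flat loop over the index range (idiomatic decomposition).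
-- Note: the Python functions mutate `mask` in place; the equivalence proved here is about the
-- return value (both Pythons perform the same mutation, as tested).


-- ===== PORT A =====
-- Tail recursion as in the Python; mask[ind] read/write via pyGet?/pySetD (negative wraparound).
def add_mask_p2 (mask : List String) (ind : Int) : Option (List String) :=
  if ind = (mask.length : Int) then none
  else
    match h : PySem.List.pyGet? mask ind with
    | none => none      -- Python raises IndexError here; excluded by Pre_
    | some v =>
      if v = "+" then some (PySem.List.pySetD mask ind "*")
      else if v = "*" then some (PySem.List.pySetD mask ind "||")
      else add_mask_p2 (PySem.List.pySetD mask ind "+") (ind + 1)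
termination_by ((mask.length : Int) - ind).toNat
decreasing_by
  have hin : PySem.Raise.InRange mask.length ind := by
    by_contra hc
    have : PySem.List.pyGet? mask ind = none := (PySem.List.pyGet?_eq_none_iff ..).2 hc
    simp [this] at h
  simp only [PySem.List.length_pySetD]
  have := hin.2
  omega

-- ===== PORT B =====
-- B's loop body, recursing structurally on the remaining index list (the for-loop of Source B).
def altGo (mask : List String) (idxs : List Int) : Option (List String) :=
  match idxs with
  | [] => none
  | i :: rest =>
    match PySem.List.pyGet? mask i with
    | none => none      -- IndexError in Python; unreachable under Pre_
    | some v =>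
      if v = "+" then some (PySem.List.pySetD mask i "*")
      else if v = "*" then some (PySem.List.pySetD mask i "||")
      else altGo (PySem.List.pySetD mask i "+") rest

def add_mask_p2_alt (mask : List String) (ind : Int) : Option (List String) :=
  altGo mask (PySem.List.pyRange ind (mask.length : Int) 1)

-- ===== PRECONDITION & SPEC =====
-- Pre_ excludes exactly |ind| out of range (ind < -len or ind > len), where the Python A raises IndexError.
def Pre_add_mask_p2 (mask : List String) (ind : Int) : Prop :=
  -(mask.length : Int) ≤ ind ∧ ind ≤ (mask.length : Int)
instance (mask : List String) (ind : Int) : Decidable (Pre_add_mask_p2 mask ind) := by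
  unfold Pre_add_mask_p2; infer_instance
def pvWitness_add_mask_p2 : List String × Int := (["+", "*", "||"], 0)

def Spec_add_mask_p2 (mask : List String) (ind : Int) (out : Option (List String)) : Prop := out = add_mask_p2_alt mask ind
instance (mask : List String) (ind : Int) (out : Option (List String)) : Decidable (Spec_add_mask_p2 mask ind out) := by unfold Spec_add_mask_p2; infer_instance

-- ===== CLAIM (what is proved, stated in full; the proofs are below) =====
def Claim_equal_add_mask_p2 : Prop := ∀ (mask : List String) (ind : Int), Dom_add_mask_p2 mask ind → Pre_add_mask_p2 mask ind → Spec_add_mask_p2 mask ind (add_mask_p2 mask ind)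

-- ===== LEMMAS AND PROOFS =====

theorem add_mask_p2_eq_altGo (fuel : Nat) (mask : List String) (ind : Int)
    (hfuel : ((mask.length : Int) - ind).toNat ≤ fuel)
    (hlo : -(mask.length : Int) ≤ ind) (hhi : ind ≤ (mask.length : Int)) :
    add_mask_p2 mask ind = altGo mask (PySem.List.pyRange ind (mask.length : Int) 1) := by
  induction fuel generalizing mask ind with
  | zero =>
    have hind : ind = (mask.length : Int) := by omega
    rw [add_mask_p2, PySem.List.pyRange_one_eq_nil (by omega)]
    simp [hind, altGo]
  | succ n ih =>
    by_cases heq : ind = (mask.length : Int)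
    · rw [add_mask_p2, PySem.List.pyRange_one_eq_nil (by omega)]
      simp [heq, altGo]
    · have hlt : ind < (mask.length : Int) := lt_of_le_of_ne hhi heq
      rw [PySem.List.pyRange_one_cons hlt]
      rw [add_mask_p2, altGo]
      simp only [if_neg heq]
      cases h : PySem.List.pyGet? mask ind with
      | none => rfl
      | some v =>
        by_cases h1 : v = "+"
        · simp [h1]
        · by_cases h2 : v = "*"
          · simp [h2]
          · simp only [if_neg h1, if_neg h2]
            have hlen : (PySem.List.pySetD mask ind "+").length = mask.length :=
              PySem.List.length_pySetD ..
            have := ih (PySem.List.pySetD mask ind "+") (ind + 1)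
              (by rw [hlen]; omega) (by rw [hlen]; omega) (by rw [hlen]; omega)
            rw [this, hlen]

-- ===== VERDICT (by name: the statement is the Claim_ definition above) =====
theorem add_mask_p2_spec : Claim_equal_add_mask_p2 := by
  intro mask ind _ hpre
  exact add_mask_p2_eq_altGo ((mask.length : Int) - ind).toNat mask ind le_rfl hpre.1 hpre.2
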